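-- pv_equiv track=rewrite | github.com/Lab-Chiesa/Integrated_miRNomics_and_Lipidomics | lib/manzutils.py | attrib_index
-- ===== SOURCE A (Python) =====
-- def attrib_index(series):
--     """Reads a column of a DataFrame, spits a list of indexes in order of
--     appearance.
--
--     Example considering a <DataFrame> df:
--
--                    TREND
--     gene
--     Snap25         Lower in Western
--     Ptprz1         Lower in Western
--     6330403A02Rik  Higher in Western
--     Casq1          Higher in Western
--     Mylk4          No change
--     Acta1          No change
--     Slc6a2         No change
--     Ngfr           No change
--     Dbh            Higher in Bl/6
--     Myh2           Higher in Bl/6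
--
--     >>> attrib_index(df["TREND"])
--
--     returns:
--
--     [1, 1, 2, 2, 3, 3, 3, 3, 4, 4]
--
--     Returns: <list>
--     """
--     returnlist = []
--     keeptrack = []
--     index = 0
--     for elem in series:
--         if elem not in keeptrack:
--             index += 1
--             keeptrack.append(elem)
--             returnlist.append(index)
--         else:
--             returnlist.append(index)
--     return returnlist
-- ===== SOURCE B (Python) =====
-- def attrib_index(series):
--     # Pass 1: map each value to the index of its first appearance.
--     first = {}
--     for i, elem in enumerate(series):
--         if elem not in first:
--             first[elem] = i
--     # Pass 2: novelty flags — 1 where the element appears for the first time.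
--     flags = [1 if first[elem] == i else 0 for i, elem in enumerate(series)]
--     # Pass 3: prefix sums of the flags.
--     result = []
--     total = 0
--     for f in flags:
--         total += f
--         result.append(total)
--     return result
-- ===== Notes on version B (the rewrite author's own statement) =====
-- stated objective: faster
-- what changed: Replaces A's single pass with a membership-scanned list and a branch-updated counter by a three-stage pipeline: build a first-occurrence-index dictionary, derive 0/1 novelty flags from it, and prefix-sum the flags.
import Mathlib
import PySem

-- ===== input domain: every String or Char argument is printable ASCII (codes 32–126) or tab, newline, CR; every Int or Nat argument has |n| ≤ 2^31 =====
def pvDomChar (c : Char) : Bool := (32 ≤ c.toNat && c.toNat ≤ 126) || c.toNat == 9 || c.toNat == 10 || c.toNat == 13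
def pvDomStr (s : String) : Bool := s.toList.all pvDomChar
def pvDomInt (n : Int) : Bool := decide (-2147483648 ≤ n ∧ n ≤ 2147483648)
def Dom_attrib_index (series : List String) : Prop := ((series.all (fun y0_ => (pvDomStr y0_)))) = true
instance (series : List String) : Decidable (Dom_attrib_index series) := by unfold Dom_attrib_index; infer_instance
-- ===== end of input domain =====

-- B replaces A's one-pass membership-list/counter loop by three staged passes:
-- first-occurrence-index dict, 0/1 novelty flags, prefix sums (objective: faster, dict lookup vs list scan).

-- ===== PORT A =====
-- A's loop: state (returnlist, keeptrack, index), branch on membership in keeptrack.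
def attribIndexLoopA : List String → List Int → List String → Int → List Int
  | [], returnlist, _, _ => returnlist
  | elem :: rest, returnlist, keeptrack, index =>
    if ¬ (elem ∈ keeptrack) then
      attribIndexLoopA rest (returnlist ++ [index + 1]) (keeptrack ++ [elem]) (index + 1)
    else
      attribIndexLoopA rest (returnlist ++ [index]) keeptrack index

def attrib_index (series : List String) : List Int :=
  attribIndexLoopA series [] [] 0

-- ===== PORT B =====
-- Pass 1: 'for i, elem in enumerate(series): if elem not in first: first[elem] = i'
def attribIndexFirst : List String → Int → PySem.Dict String Int → PySem.Dict String Int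
  | [], _, first => first
  | elem :: rest, i, first =>
      attribIndexFirst rest (i + 1) (if first.contains elem then first else first.insert elem i)

-- Pass 3: 'for f in flags: total += f; result.append(total)'
def attribIndexAccum : List Int → Int → List Int → List Int
  | [], _, result => result
  | f :: rest, total, result => attribIndexAccum rest (total + f) (result ++ [total + f])

-- Pass 2 is the map below: '[1 if first[elem] == i else 0 for i, elem in enumerate(series)]'
-- (elem is always a key of first, so first[elem] never raises; 'first[elem] == i' is get? = some i)
def attrib_index_alt (series : List String) : List Int :=
  attribIndexAccum
    ((PySem.List.enumerate series 0).map
      (fun p => if (attribIndexFirst series 0 PySem.Dict.empty).get? p.2 = some p.1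
                then (1 : Int) else 0))
    0 []

-- ===== PRECONDITION & SPEC =====
def Spec_attrib_index (series : List String) (out : List Int) : Prop := out = attrib_index_alt series
instance (series : List String) (out : List Int) : Decidable (Spec_attrib_index series out) := by unfold Spec_attrib_index; infer_instance

-- ===== CLAIM (what is proved, stated in full; the proofs are below) =====
def Claim_equal_attrib_index : Prop := ∀ (series : List String), Dom_attrib_index series → Spec_attrib_index series (attrib_index series)

-- ===== LEMMAS AND PROOFS =====

-- Reference: result values with kt the deduplicated processed prefix.
def pvRef : List String → List String → List Int
  | [], _ => []
  | e :: rest, kt =>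
      if e ∈ kt then ((kt.length : Int)) :: pvRef rest kt
      else (((kt.length : Int) + 1)) :: pvRef rest (kt ++ [e])

-- Reference novelty flags with kt the deduplicated processed prefix.
def pvFlags : List String → List String → List Int
  | [], _ => []
  | e :: rest, kt =>
      if e ∈ kt then (0 : Int) :: pvFlags rest kt
      else (1 : Int) :: pvFlags rest (kt ++ [e])

-- A's loop produces acc ++ pvRef (the counter always equals keeptrack's length).
theorem attribIndexLoopA_eq (series : List String) :
    ∀ (acc : List Int) (kt : List String),
      attribIndexLoopA series acc kt (kt.length : Int) = acc ++ pvRef series kt := by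
  induction series with
  | nil => intro acc kt; simp [attribIndexLoopA, pvRef]
  | cons e rest ih =>
    intro acc kt
    by_cases hmem : e ∈ kt
    · simp only [attribIndexLoopA, pvRef, hmem, not_true, if_false]
      rw [ih]
      simp
    · simp only [attribIndexLoopA, pvRef, hmem, not_false_iff, if_true, ite_false]
      have h1 : ((kt.length : Int) + 1) = ((kt ++ [e]).length : Int) := by
        simp
      rw [h1, ih]
      simp [← h1]

-- Prefix-summing pvFlags from total = kt.length gives acc ++ pvRef.
theorem attribIndexAccum_flags (series : List String) :
    ∀ (kt : List String) (acc : List Int),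
      attribIndexAccum (pvFlags series kt) (kt.length : Int) acc = acc ++ pvRef series kt := by
  induction series with
  | nil => intro kt acc; simp [pvFlags, attribIndexAccum, pvRef]
  | cons e rest ih =>
    intro kt acc
    by_cases hmem : e ∈ kt
    · simp only [pvFlags, pvRef, hmem, ite_true, attribIndexAccum]
      rw [show (kt.length : Int) + 0 = (kt.length : Int) by ring, ih]
      simp
    · simp only [pvFlags, pvRef, hmem, ite_false, attribIndexAccum]
      have h1 : ((kt.length : Int) + 1) = ((kt ++ [e]).length : Int) := by simp
      rw [h1, ih]
      simp [← h1]

-- Pass 1 computes the first-occurrence index of every value.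
theorem attribIndexFirst_get (l : List String) :
    ∀ (i0 : Int) (d : PySem.Dict String Int) (x : String),
      (attribIndexFirst l i0 d).get? x =
        (d.get? x).or ((PySem.List.index? l x).map (fun k => i0 + (k : Int))) := by
  induction l with
  | nil =>
    intro i0 d x
    simp [attribIndexFirst, PySem.List.index?]
  | cons e rest ih =>
    intro i0 d x
    by_cases hc : d.contains e = true
    · simp only [attribIndexFirst, hc, ite_true]
      rw [ih]
      by_cases hx : x = e
      · subst hx
        have hs : (d.get? x).isSome := by
          rw [← PySem.Dict.contains_eq_isSome_get?]; exact hc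
        obtain ⟨v, hv⟩ := Option.isSome_iff_exists.mp hs
        simp [hv]
      · rw [PySem.List.index?_cons_of_ne rest (Ne.symm hx)]
        cases hdx : d.get? x with
        | some v => simp
        | none =>
          simp only [Option.none_or]
          cases hi : PySem.List.index? rest x with
          | none => simp
          | some k => simp; ring
    · simp only [attribIndexFirst, hc, Bool.false_eq_true, if_false]
      rw [ih]
      by_cases hx : x = e
      · subst hx
        have hdx : d.get? x = none := by
          cases hdo : d.get? x with
          | none => rfl
          | some v =>
            exact absurd (by rw [PySem.Dict.contains_eq_isSome_get?, hdo]; rfl) hc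
        rw [PySem.Dict.get?_insert_self, PySem.List.index?_cons_self, hdx]
        simp
      · rw [PySem.Dict.get?_insert_of_ne d i0 hx, PySem.List.index?_cons_of_ne rest (Ne.symm hx)]
        cases hdx : d.get? x with
        | some v => simp
        | none =>
          simp only [Option.none_or]
          cases hi : PySem.List.index? rest x with
          | none => simp
          | some k => simp; ring

-- B's flag at position |pre| equals the reference novelty flag.
theorem attribIndexFlags_eq (series : List String) :
    ∀ (suffix pre kt : List String),
      series = pre ++ suffix → (∀ x, x ∈ kt ↔ x ∈ pre) →
      (PySem.List.enumerate suffix (pre.length : Int)).map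
        (fun p => if (attribIndexFirst series 0 PySem.Dict.empty).get? p.2 = some p.1
                  then (1 : Int) else 0)
        = pvFlags suffix kt := by
  intro suffix
  induction suffix with
  | nil => intro pre kt _ _; simp [PySem.List.enumerate_nil, pvFlags]
  | cons e rest ih =>
    intro pre kt hser hkt
    rw [PySem.List.enumerate_cons, List.map_cons, pvFlags]
    have hget : (attribIndexFirst series 0 PySem.Dict.empty).get? e
        = (PySem.List.index? series e).map (fun k => (k : Int)) := by
      rw [attribIndexFirst_get]
      simp [PySem.Dict.get?_empty]
    by_cases hmem : e ∈ kt
    · have hpre : e ∈ pre := (hkt e).mp hmem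
      have hidx : PySem.List.index? series e = PySem.List.index? pre e := by
        rw [hser]; exact PySem.List.index?_append_of_mem _ hpre
      obtain ⟨k, hk⟩ := Option.isSome_iff_exists.mp
        ((PySem.List.index?_isSome_iff pre e).mpr hpre)
      obtain ⟨p1, p2, hpe, hlen, hnp⟩ := (PySem.List.index?_eq_some_iff pre e k).mp hk
      have hklt : k < pre.length := by
        subst hlen; rw [hpe]; simp
      have hne : (attribIndexFirst series 0 PySem.Dict.empty).get? e
          ≠ some ((pre.length : Int)) := by
        rw [hget, hidx, hk]
        intro h
        simp at h
        omega
      rw [if_neg hne, if_pos hmem]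
      have hser' : series = (pre ++ [e]) ++ rest := by rw [hser]; simp
      have hkt' : ∀ x, x ∈ kt ↔ x ∈ pre ++ [e] := by
        intro x; rw [hkt x]
        constructor
        · intro h; exact List.mem_append_left _ h
        · intro h
          rcases List.mem_append.mp h with h | h
          · exact h
          · simp at h; subst h; exact hpre
      have hone : (((pre ++ [e]).length : Int)) = (pre.length : Int) + 1 := by
        simp
      have htail := ih (pre ++ [e]) kt hser' hkt'
      rw [hone] at htail
      rw [htail]
    · have hpre : e ∉ pre := fun h => hmem ((hkt e).mpr h)
      have hidx : PySem.List.index? series e = some pre.length := by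
        rw [hser]
        exact (PySem.List.index?_eq_some_iff (pre ++ e :: rest) e pre.length).mpr ⟨pre, rest, rfl, rfl, hpre⟩
      have heq : (attribIndexFirst series 0 PySem.Dict.empty).get? e
          = some ((pre.length : Int)) := by
        rw [hget, hidx]; rfl
      rw [if_pos heq, if_neg hmem]
      have hser' : series = (pre ++ [e]) ++ rest := by rw [hser]; simp
      have hkt' : ∀ x, x ∈ kt ++ [e] ↔ x ∈ pre ++ [e] := by
        intro x
        simp only [List.mem_append, List.mem_singleton]
        rw [hkt x]
      have hone : (((pre ++ [e]).length : Int)) = (pre.length : Int) + 1 := by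
        simp
      have htail := ih (pre ++ [e]) (kt ++ [e]) hser' hkt'
      rw [hone] at htail
      rw [htail]

-- ===== VERDICT (by name: the statement is the Claim_ definition above) =====
theorem attrib_index_spec : Claim_equal_attrib_index := by
  intro series _
  unfold Spec_attrib_index attrib_index attrib_index_alt
  have hA := attribIndexLoopA_eq series [] []
  simp only [List.length_nil, Int.natCast_zero, List.nil_append] at hA
  rw [hA]
  have hF := attribIndexFlags_eq series series [] [] (by simp) (by simp)
  simp only [List.length_nil, Int.natCast_zero] at hF
  rw [hF]
  have hAcc := attribIndexAccum_flags series [] []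
  simp only [List.length_nil, Int.natCast_zero, List.nil_append] at hAcc
  rw [hAcc]
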